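-- pv_equiv track=rewrite | github.com/MagnusPoppe/CSP-Best-First-Search | nonogram/entry.py | get_all_possibilities
-- ===== SOURCE A (Python) =====
-- def get_all_possibilities(domain):
--     def permutations_by_row(grid, i, values, results):
--         if i == len(grid):
--             # output = [0] * self.length
--             # for val in values:
--             #     output[val] = 1
--             # results.append(output)
--             results.append(values) # If only positions of values.
--             return
--         for val in grid[i]:
--             permutations_by_row(grid, i + 1, values + [val], results)
--         return results
--
--     return permutations_by_row(domain, 0, [], [])
-- ===== SOURCE B (Python) =====
-- def get_all_possibilities(domain):
--     result = [[]]
--     for row in domain: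
--         result = [prev + [val] for prev in result for val in row]
--     return result
-- ===== Notes on version B (the rewrite author's own statement) =====
-- stated objective: simpler
-- what changed: Replaced the recursive DFS with a mutable results accumulator by an iterative left-fold Cartesian product that rebuilds the partial-combination list row by row.
-- outside the precondition, e.g. on get_all_possibilities([]): A returns None, B returns [[]]
import Mathlib
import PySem

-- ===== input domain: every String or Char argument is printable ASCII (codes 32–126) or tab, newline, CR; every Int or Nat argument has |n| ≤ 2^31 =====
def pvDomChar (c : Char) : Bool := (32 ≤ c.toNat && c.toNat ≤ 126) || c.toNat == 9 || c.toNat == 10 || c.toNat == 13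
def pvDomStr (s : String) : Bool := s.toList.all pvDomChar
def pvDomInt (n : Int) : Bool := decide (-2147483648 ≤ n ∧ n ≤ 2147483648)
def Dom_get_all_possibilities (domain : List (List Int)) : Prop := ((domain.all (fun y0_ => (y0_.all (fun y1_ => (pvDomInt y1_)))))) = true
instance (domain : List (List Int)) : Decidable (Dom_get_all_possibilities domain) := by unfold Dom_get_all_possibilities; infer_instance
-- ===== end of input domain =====

-- B replaces A's recursive DFS with a results accumulator by an iterative left-fold
-- Cartesian product (simpler decomposition); equal on every non-empty domain (Pre_
-- excludes [], where A returns None, not a list).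


-- ===== PORT A =====
-- Python recursion on index i into the fixed grid, modelled as recursion on the
-- remaining suffix; `results` is the mutated accumulator, threaded through the loop.
def permutations_by_row (grid : List (List Int)) (values : List Int)
    (results : List (List Int)) : List (List Int) :=
  match grid with
  | [] => results ++ [values]
  | row :: rest =>
      row.foldl (fun res val => permutations_by_row rest (values ++ [val]) res) results

def get_all_possibilities (domain : List (List Int)) : List (List Int) :=
  permutations_by_row domain [] []

-- ===== PORT B =====
def get_all_possibilities_alt (domain : List (List Int)) : List (List Int) :=
  domain.foldl (fun result row => result.flatMap (fun prev => row.map (fun val => prev ++ [val]))) [[]]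

-- ===== PRECONDITION & SPEC =====
-- Pre_ excludes the empty domain, on which A's helper hits its base case at top level
-- and returns None (no list value of the declared type); B returns [[]] there.
def Pre_get_all_possibilities (domain : List (List Int)) : Prop := domain ≠ []
instance (domain : List (List Int)) : Decidable (Pre_get_all_possibilities domain) := by unfold Pre_get_all_possibilities; infer_instance
def pvWitness_get_all_possibilities : List (List Int) := [[1, 2], [3]]

def Spec_get_all_possibilities (domain : List (List Int)) (out : List (List Int)) : Prop := out = get_all_possibilities_alt domain
instance (domain : List (List Int)) (out : List (List Int)) : Decidable (Spec_get_all_possibilities domain out) := by unfold Spec_get_all_possibilities; infer_instance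

-- ===== CLAIM (what is proved, stated in full; the proofs are below) =====
def Claim_equal_get_all_possibilities : Prop := ∀ (domain : List (List Int)), Dom_get_all_possibilities domain → Pre_get_all_possibilities domain → Spec_get_all_possibilities domain (get_all_possibilities domain)

-- ===== LEMMAS AND PROOFS =====

-- the row-by-row Cartesian product, in recursive form (proof-only helper)
def prodR : List (List Int) → List (List Int)
  | [] => [[]]
  | row :: rest => row.flatMap (fun v => (prodR rest).map (fun c => v :: c))

theorem permA_eq (grid : List (List Int)) :
    ∀ (values : List Int) (results : List (List Int)),
      permutations_by_row grid values results
        = results ++ (prodR grid).map (fun c => values ++ c) := by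
  induction grid with
  | nil => intro values results; simp [permutations_by_row, prodR]
  | cons row rest ih =>
      intro values results
      simp only [permutations_by_row, prodR]
      induction row generalizing results with
      | nil => simp
      | cons v vs ihr =>
          simp only [List.foldl_cons, List.flatMap_cons, List.map_append]
          rw [ihr, ih]
          simp [List.append_assoc, List.map_map, Function.comp]

theorem foldB_eq (grid : List (List Int)) :
    ∀ (acc : List (List Int)),
      grid.foldl (fun result row => result.flatMap (fun prev => row.map (fun val => prev ++ [val]))) acc
        = acc.flatMap (fun prev => (prodR grid).map (fun c => prev ++ c)) := by
  induction grid with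
  | nil => intro acc; simp [prodR]
  | cons row rest ih =>
      intro acc
      simp only [List.foldl_cons, prodR]
      rw [ih]
      simp only [List.flatMap_assoc]
      congr 1; funext prev
      simp only [List.flatMap_map, List.map_flatMap, List.map_map, Function.comp]
      congr 1; funext v
      congr 1; funext c
      simp

theorem ports_agree (domain : List (List Int)) :
    get_all_possibilities domain = get_all_possibilities_alt domain := by
  simp [get_all_possibilities, get_all_possibilities_alt, permA_eq, foldB_eq]

-- ===== VERDICT (by name: the statement is the Claim_ definition above) =====
theorem get_all_possibilities_spec : Claim_equal_get_all_possibilities := by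
  intro domain _ _
  exact ports_agree domain
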